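-- pv_equiv track=rewrite | github.com/jiadaizhao/LintCode | 1301-1400/1383-Subtree Count/1383-Subtree Count.py | getSubtreeCount
-- ===== SOURCE A (Python) =====
-- import collections
--
-- def getSubtreeCount(start, end):
--     # Write your code here
--     MOD = 10000007
--     graph = collections.defaultdict(list)
--     for s, e in zip(start, end):
--         graph[s].append(e)
--
--     def dfs(root, prev):
--         includeRoot, excludeRoot = 1, 0
--         for neighbor in graph[root]:
--             if neighbor != prev:
--                 nextIncludeRoot, nextExcludeRoot = dfs(neighbor, root)
--                 includeRoot = includeRoot * (nextIncludeRoot + 1) % MOD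
--                 excludeRoot = (excludeRoot + nextIncludeRoot + nextExcludeRoot) % MOD
--
--         return includeRoot, excludeRoot
--
--     includeRoot, excludeRoot = dfs(1, -1)
--     return (includeRoot + excludeRoot) % MOD
-- ===== SOURCE B (Python) =====
-- def getSubtreeCount(start, end):
--     # No adjacency index at all: scan the raw edge list at each node; the DP value
--     # is (include(v), subtree-sum of include(v)); the answer is the subtree-sum at
--     # node 1, since include(1)+exclude(1) == sum of include over the DFS tree mod M.
--     MOD = 10000007
--     edges = list(zip(start, end))
--
--     def solve(node, parent):
--         inc, tot = 1, 0
--         for s, e in edges: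
--             if s == node and e != parent:
--                 ci, ct = solve(e, node)
--                 inc = inc * (ci + 1) % MOD
--                 tot = (tot + ct) % MOD
--         return inc, (tot + inc) % MOD
--
--     return solve(1, -1)[1]
-- ===== Notes on version B (the rewrite author's own statement) =====
-- stated objective: simpler
-- what changed: B drops A's defaultdict adjacency graph entirely (it scans the raw zipped edge list at each node with an s==node guard) and replaces A's two-value (include, exclude) DP by the pair (include, subtree-sum-of-include), returning the subtree-sum at node 1 via the identity include(1)+exclude(1) = sum of include over the DFS tree mod M; exclude is never computed.
import Mathlib
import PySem

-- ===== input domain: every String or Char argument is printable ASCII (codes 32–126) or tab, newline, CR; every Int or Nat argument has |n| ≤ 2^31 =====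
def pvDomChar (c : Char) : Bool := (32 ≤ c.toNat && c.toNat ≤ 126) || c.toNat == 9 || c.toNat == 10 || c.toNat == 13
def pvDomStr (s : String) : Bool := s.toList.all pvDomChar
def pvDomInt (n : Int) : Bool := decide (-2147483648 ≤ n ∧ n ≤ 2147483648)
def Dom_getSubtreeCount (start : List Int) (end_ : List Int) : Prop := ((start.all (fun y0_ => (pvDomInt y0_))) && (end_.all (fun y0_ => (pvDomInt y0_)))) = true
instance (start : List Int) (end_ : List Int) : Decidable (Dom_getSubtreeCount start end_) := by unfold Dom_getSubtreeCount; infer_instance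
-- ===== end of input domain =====

-- B drops A's adjacency dict entirely (it scans the raw edge list at each node) and
-- replaces the (include, exclude) pair DP by (include, subtree-sum-of-include), the
-- answer being the subtree-sum at node 1; objective: simpler (no graph construction),
-- not faster. Both ports use the same depth fuel (zip length + 2); equivalence is unconditional.

-- ===== PORT A =====
def pvMOD : Int := 10000007

-- graph = collections.defaultdict(list); for s, e in zip(start, end): graph[s].append(e)
def pvBuildGraphA (pairs : List (Int × Int)) : PySem.Dict Int (List Int) :=
  pairs.foldl (fun g p => g.modify p.1 [] (fun l => l ++ [p.2])) PySem.Dict.empty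

-- def dfs(root, prev): … returns (includeRoot, excludeRoot); fuel makes it total in Lean
def pvDfsA (g : PySem.Dict Int (List Int)) : Nat → Int → Int → Int × Int
  | 0, _, _ => (0, 0)
  | (fuel+1), root, prev =>
    (g.getD root []).foldl
      (fun st neighbor =>
        if neighbor ≠ prev then
          let r := pvDfsA g fuel neighbor root
          (st.1 * (r.1 + 1) % pvMOD, (st.2 + r.1 + r.2) % pvMOD)
        else st)
      (1, 0)

def getSubtreeCount (start : List Int) (end_ : List Int) : Int :=
  let g := pvBuildGraphA (start.zip end_)
  let r := pvDfsA g ((start.zip end_).length + 2) 1 (-1)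
  (r.1 + r.2) % pvMOD

-- ===== PORT B =====
def pvM : Int := 10000007

-- def solve(node, parent): inc, tot = 1, 0; for s, e in edges: if s == node and
-- e != parent: ci, ct = solve(e, node); …; return inc, (tot + inc) % MOD
-- (fuel makes it total in Lean)
def pvSolveB (edges : List (Int × Int)) : Nat → Int → Int → Int × Int
  | 0, _, _ => (0, 0)
  | (fuel+1), node, parent =>
    let st := edges.foldl
      (fun st p =>
        if p.1 = node ∧ p.2 ≠ parent then
          let r := pvSolveB edges fuel p.2 node
          (st.1 * (r.1 + 1) % pvM, (st.2 + r.2) % pvM)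
        else st)
      (1, 0)
    (st.1, (st.2 + st.1) % pvM)

def getSubtreeCount_alt (start : List Int) (end_ : List Int) : Int :=
  (pvSolveB (start.zip end_) ((start.zip end_).length + 2) 1 (-1)).2

-- ===== PRECONDITION & SPEC =====
def Spec_getSubtreeCount (start : List Int) (end_ : List Int) (out : Int) : Prop :=
  out = getSubtreeCount_alt start end_
instance (start : List Int) (end_ : List Int) (out : Int) : Decidable (Spec_getSubtreeCount start end_ out) := by
  unfold Spec_getSubtreeCount; infer_instance

-- ===== CLAIM (what is proved, stated in full; the proofs are below) =====
def Claim_equal_getSubtreeCount : Prop := ∀ (start : List Int) (end_ : List Int), Dom_getSubtreeCount start end_ → Spec_getSubtreeCount start end_ (getSubtreeCount start end_)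

-- ===== LEMMAS AND PROOFS =====

-- B's guarded scan of the raw edge list is A's fold over the adjacency list of v
lemma pvFoldGuard (body : Int × Int → Int → Int × Int) (v par : Int) :
    ∀ (es : List (Int × Int)) (init : Int × Int),
      es.foldl (fun st p => if p.1 = v ∧ p.2 ≠ par then body st p.2 else st) init
        = ((es.filter (fun p => p.1 == v)).map (·.2)).foldl
            (fun st e => if e ≠ par then body st e else st) init := by
  intro es
  induction es with
  | nil => intro init; simp
  | cons p es ih =>
      intro init
      by_cases hv : p.1 = v
      · by_cases hp : p.2 ≠ par
        · simp [hv, hp, ih]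
        · have hp' : p.2 = par := not_ne_iff.mp hp
          simp [hv, hp', ih]
      · simp [hv, ih]

-- main invariant: B returns (A's include, (A's include + A's exclude) % M)
lemma pvSolveB_eq (start end_ : List Int) :
    ∀ (fuel : Nat) (v p : Int),
      pvSolveB (start.zip end_) fuel v p
        = ((pvDfsA (pvBuildGraphA (start.zip end_)) fuel v p).1,
           ((pvDfsA (pvBuildGraphA (start.zip end_)) fuel v p).1
            + (pvDfsA (pvBuildGraphA (start.zip end_)) fuel v p).2) % pvMOD) := by
  intro fuel
  induction fuel with
  | zero => intro v p; rfl
  | succ fuel ih =>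
      intro v p
      have hadj : (pvBuildGraphA (start.zip end_)).getD v []
          = ((start.zip end_).filter (fun p => p.1 == v)).map (·.2) := by
        unfold pvBuildGraphA
        rw [PySem.Dict.getD_foldl_modify_append]
        simp
      show (let st := (start.zip end_).foldl
              (fun st q =>
                if q.1 = v ∧ q.2 ≠ p then
                  let r := pvSolveB (start.zip end_) fuel q.2 v
                  (st.1 * (r.1 + 1) % pvM, (st.2 + r.2) % pvM)
                else st)
              (1, 0)
            (st.1, (st.2 + st.1) % pvM)) = _
      rw [pvFoldGuard (fun st e =>
            let r := pvSolveB (start.zip end_) fuel e v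
            (st.1 * (r.1 + 1) % pvM, (st.2 + r.2) % pvM)) v p (start.zip end_) (1, 0)]
      rw [← hadj]
      -- now both sides fold over the same adjacency list; the step functions coincide
      have hfun :
          (fun (st : Int × Int) (e : Int) =>
              if e ≠ p then
                let r := pvSolveB (start.zip end_) fuel e v
                (st.1 * (r.1 + 1) % pvM, (st.2 + r.2) % pvM)
              else st)
          = (fun (st : Int × Int) (e : Int) =>
              if e ≠ p then
                let r := pvDfsA (pvBuildGraphA (start.zip end_)) fuel e v
                (st.1 * (r.1 + 1) % pvMOD, (st.2 + r.1 + r.2) % pvMOD)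
              else st) := by
        funext st e
        by_cases he : e ≠ p
        · rw [if_pos he, if_pos he]
          simp only [ih e v]
          rcases hq : pvDfsA (pvBuildGraphA (start.zip end_)) fuel e v with ⟨a1, a2⟩
          show (st.1 * (a1 + 1) % pvM, (st.2 + (a1 + a2) % pvMOD) % pvM)
              = (st.1 * (a1 + 1) % pvMOD, (st.2 + a1 + a2) % pvMOD)
          rw [Prod.mk.injEq]
          constructor
          · simp [pvM, pvMOD]
          · simp only [pvM, pvMOD]; omega
        · rw [if_neg he, if_neg he]
      rw [hfun]
      rcases hq : ((pvBuildGraphA (start.zip end_)).getD v []).foldl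
          (fun (st : Int × Int) (e : Int) =>
            if e ≠ p then
              let r := pvDfsA (pvBuildGraphA (start.zip end_)) fuel e v
              (st.1 * (r.1 + 1) % pvMOD, (st.2 + r.1 + r.2) % pvMOD)
            else st) (1, 0) with ⟨i2, e2⟩
      show (i2, (e2 + i2) % pvM)
          = ((pvDfsA (pvBuildGraphA (start.zip end_)) (fuel+1) v p).1,
             ((pvDfsA (pvBuildGraphA (start.zip end_)) (fuel+1) v p).1
              + (pvDfsA (pvBuildGraphA (start.zip end_)) (fuel+1) v p).2) % pvMOD)
      have hA : pvDfsA (pvBuildGraphA (start.zip end_)) (fuel+1) v p = (i2, e2) := by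
        show ((pvBuildGraphA (start.zip end_)).getD v []).foldl _ (1, 0) = (i2, e2)
        exact hq
      rw [hA]
      rw [Prod.mk.injEq]
      exact ⟨rfl, by simp only [pvM, pvMOD]; omega⟩

-- ===== VERDICT (by name: the statement is the Claim_ definition above) =====
theorem getSubtreeCount_spec : Claim_equal_getSubtreeCount := by
  intro start end_ _hdom
  unfold Spec_getSubtreeCount
  have hB : getSubtreeCount_alt start end_
      = (pvSolveB (start.zip end_) ((start.zip end_).length + 2) 1 (-1)).2 := rfl
  rw [hB, pvSolveB_eq start end_ ((start.zip end_).length + 2) 1 (-1)]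
  rfl
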